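-- pv_equiv track=rewrite | github.com/NoamAriel/bioinformatic_silk | libraries/amino_acid_group_motifs.py | _taxonomy_chain_from_lineage
-- ===== SOURCE A (Python) =====
-- from typing import Any, Dict, Iterable, List, Mapping, Optional, Sequence, Tuple
--
-- RANK_ORDER = [
--     "class",
--     "subclass",
--     "infraclass",
--     "cohort",
--     "superorder",
--     "order",
--     "suborder",
--     "infraorder",
--     "parvorder",
--     "superfamily",
--     "family",
--     "subfamily",
--     "tribe",
--     "subtribe",
--     "genus",
--     "subgenus",
--     "species",
--     "subspecies",
-- ]
--
-- def _taxonomy_chain_from_lineage(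
--     lineage: List[Tuple[str, str]],
--     taxonomy_terms: Optional[Iterable[str]] = None,
-- ) -> List[Tuple[str, str]]:
--     rank_to_name: Dict[str, str] = {}
--     for rank, name in lineage:
--         rank_to_name[str(rank).lower()] = str(name)
--
--     chain: List[Tuple[str, str]] = []
--     for rank in RANK_ORDER:
--         if rank in rank_to_name:
--             chain.append((rank, rank_to_name[rank]))
--
--     if not taxonomy_terms:
--         return chain
--
--     terms_lower = {str(t).strip().lower() for t in taxonomy_terms if str(t).strip()}
--     cutoff_idx = None
--     for idx, (_, name) in enumerate(chain):
--         if name.lower() in terms_lower: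
--             cutoff_idx = idx
--     if cutoff_idx is None:
--         return chain
--     return chain[cutoff_idx:]
-- ===== SOURCE B (Python) =====
-- RANK_ORDER = [
--     "class",
--     "subclass",
--     "infraclass",
--     "cohort",
--     "superorder",
--     "order",
--     "suborder",
--     "infraorder",
--     "parvorder",
--     "superfamily",
--     "family",
--     "subfamily",
--     "tribe",
--     "subtribe",
--     "genus",
--     "subgenus",
--     "species",
--     "subspecies",
-- ]
--
-- def _taxonomy_chain_from_lineage(lineage, taxonomy_terms=None):
--     # For each known rank, take the LAST lineage entry with that (lowercased) rank:
--     # last-occurrence-wins, just as a dict overwritten in input order.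
--     chain = []
--     for rank in RANK_ORDER:
--         for r, name in reversed(lineage):
--             if str(r).lower() == rank:
--                 chain.append((rank, str(name)))
--                 break
--     if not taxonomy_terms:
--         return chain
--     terms_lower = {str(t).strip().lower() for t in taxonomy_terms if str(t).strip()}
--     # Walk the chain from the end; the first match from the rear is the last
--     # forward match, and the suffix gathered so far is exactly chain[cutoff:].
--     suffix = []
--     for rank, name in reversed(chain):
--         suffix = [(rank, name)] + suffix
--         if name.lower() in terms_lower:
--             return suffix
--     return chain
-- ===== Notes on version B (the rewrite author's own statement) =====
-- stated objective: alternative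
-- what changed: B drops the rank->name dict entirely (each RANK_ORDER rank is resolved by a first-match scan of the reversed lineage, which equals last-occurrence-wins) and trims by walking the chain back-to-front, returning the accumulated suffix at the first rear match instead of recording a last matching index and slicing.
import Mathlib
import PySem

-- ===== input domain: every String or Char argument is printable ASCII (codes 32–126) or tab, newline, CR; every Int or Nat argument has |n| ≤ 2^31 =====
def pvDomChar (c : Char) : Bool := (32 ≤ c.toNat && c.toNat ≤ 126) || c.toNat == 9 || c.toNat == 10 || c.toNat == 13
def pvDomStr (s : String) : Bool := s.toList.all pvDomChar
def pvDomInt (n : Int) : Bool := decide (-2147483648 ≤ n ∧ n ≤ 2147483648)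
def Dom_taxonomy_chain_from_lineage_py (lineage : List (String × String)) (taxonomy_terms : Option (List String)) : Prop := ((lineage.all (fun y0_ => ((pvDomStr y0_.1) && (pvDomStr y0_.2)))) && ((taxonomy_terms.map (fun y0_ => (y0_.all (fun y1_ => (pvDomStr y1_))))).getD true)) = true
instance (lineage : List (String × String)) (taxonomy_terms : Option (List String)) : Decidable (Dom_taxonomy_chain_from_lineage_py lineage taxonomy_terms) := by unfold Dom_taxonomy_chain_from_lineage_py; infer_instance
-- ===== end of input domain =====

-- B replaces A's dict-then-membership-scan by a per-rank reverse search of the lineage and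
-- trims by walking the chain back-to-front instead of recording a last matching index: an
-- alternative decomposition, equal on every input (A is total).

def RANK_ORDER : List String :=
  ["class", "subclass", "infraclass", "cohort", "superorder", "order", "suborder",
   "infraorder", "parvorder", "superfamily", "family", "subfamily", "tribe",
   "subtribe", "genus", "subgenus", "species", "subspecies"]

-- terms_lower = {str(t).strip().lower() for t in taxonomy_terms if str(t).strip()}
-- (this line is textually identical in A and B, so both ports use this helper)
def termsLower (ts : List String) : PySem.Set String :=
  PySem.Set.ofList ((ts.filter (fun t => !(PySem.Str.strip t == ""))).map
    (fun t => PySem.Str.lower (PySem.Str.strip t)))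

-- ===== PORT A =====
-- chain = [(rank, rank_to_name[rank]) for rank in RANK_ORDER if rank in rank_to_name]
def aChain (d : PySem.Dict String String) : List (String × String) :=
  RANK_ORDER.foldl (fun acc r =>
    match d.get? r with
    | some n => acc ++ [(r, n)]
    | none => acc) []

def taxonomy_chain_from_lineage_py (lineage : List (String × String)) (taxonomy_terms : Option (List String)) : List (String × String) :=
  let d := lineage.foldl (fun d p => d.insert (PySem.Str.lower p.1) p.2) PySem.Dict.empty
  let chain := aChain d
  match taxonomy_terms with
  | none => chain
  | some ts =>
    if ts.isEmpty then chain
    else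
      let terms := termsLower ts
      let cutoff := (PySem.List.enumerate chain 0).foldl
        (fun c p => if PySem.Str.lower p.2.2 ∈ terms then some p.1 else c) none
      match cutoff with
      | none => chain
      | some i => PySem.List.slice chain (some i) none

-- ===== PORT B =====
-- for rank in RANK_ORDER: scan reversed(lineage) for the first entry with that rank
def bChain (lineage : List (String × String)) : List (String × String) :=
  RANK_ORDER.foldl (fun acc r =>
    match lineage.reverse.find? (fun p => PySem.Str.lower p.1 == r) with
    | some p => acc ++ [(r, p.2)]
    | none => acc) []

-- walk reversed(chain) building the suffix; first rear match returns it
def altTrim (terms : PySem.Set String) : List (String × String) → List (String × String) → Option (List (String × String))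
  | [], _ => none
  | p :: rest, suffix =>
    if PySem.Str.lower p.2 ∈ terms then some (p :: suffix)
    else altTrim terms rest (p :: suffix)

def taxonomy_chain_from_lineage_py_alt (lineage : List (String × String)) (taxonomy_terms : Option (List String)) : List (String × String) :=
  let chain := bChain lineage
  match taxonomy_terms with
  | none => chain
  | some ts =>
    if ts.isEmpty then chain
    else (altTrim (termsLower ts) chain.reverse []).getD chain

-- ===== PRECONDITION & SPEC =====
def Spec_taxonomy_chain_from_lineage_py (lineage : List (String × String)) (taxonomy_terms : Option (List String)) (out : List (String × String)) : Prop := out = taxonomy_chain_from_lineage_py_alt lineage taxonomy_terms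
instance (lineage : List (String × String)) (taxonomy_terms : Option (List String)) (out : List (String × String)) : Decidable (Spec_taxonomy_chain_from_lineage_py lineage taxonomy_terms out) := by unfold Spec_taxonomy_chain_from_lineage_py; infer_instance

-- ===== CLAIM (what is proved, stated in full; the proofs are below) =====
def Claim_equal_taxonomy_chain_from_lineage_py : Prop := ∀ (lineage : List (String × String)) (taxonomy_terms : Option (List String)), Dom_taxonomy_chain_from_lineage_py lineage taxonomy_terms → Spec_taxonomy_chain_from_lineage_py lineage taxonomy_terms (taxonomy_chain_from_lineage_py lineage taxonomy_terms)

-- ===== LEMMAS AND PROOFS =====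

-- the dict lookup is the last-occurrence lookup: get? of the insert-fold is the
-- first match in the reversed lineage (falling back to the initial dict)
theorem dict_get_eq_rev_find (l : List (String × String)) (d : PySem.Dict String String) (r : String) :
    (l.foldl (fun d p => d.insert (PySem.Str.lower p.1) p.2) d).get? r
      = ((l.reverse.find? (fun p => PySem.Str.lower p.1 == r)).map Prod.snd).or (d.get? r) := by
  induction l generalizing d with
  | nil => simp
  | cons p rest ih =>
    simp only [List.foldl_cons, List.reverse_cons, List.find?_append, ih]
    by_cases h : PySem.Str.lower p.1 = r
    · have hb : (PySem.Str.lower p.1 == r) = true := by simp [h]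
      cases hf : rest.reverse.find? (fun q => PySem.Str.lower q.1 == r) <;>
        simp [List.find?, h, PySem.Dict.get?_insert_self]
    · have hb : (PySem.Str.lower p.1 == r) = false := by simp [h]
      cases hf : rest.reverse.find? (fun q => PySem.Str.lower q.1 == r) <;>
        simp [List.find?, hb, PySem.Dict.get?_insert_of_ne _ _ (fun he => h he.symm)]

theorem chain_eq (lineage : List (String × String)) :
    aChain (lineage.foldl (fun d p => d.insert (PySem.Str.lower p.1) p.2) PySem.Dict.empty)
      = bChain lineage := by
  unfold aChain bChain
  apply List.foldl_ext
  intro acc r _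
  have h := dict_get_eq_rev_find lineage PySem.Dict.empty r
  simp only [PySem.Dict.get?_empty, Option.or_none] at h
  rw [h]
  cases lineage.reverse.find? (fun p => PySem.Str.lower p.1 == r) <;> simp

-- A's cutoff-index fold, generalized over the enumeration start and accumulator
def cutoffAux (terms : PySem.Set String) (s : Int) (c : Option Int) (xs : List (String × String)) : Option Int :=
  (PySem.List.enumerate xs s).foldl
    (fun c p => if PySem.Str.lower p.2.2 ∈ terms then some p.1 else c) c

theorem cutoffAux_append (terms : PySem.Set String) (s : Int) (c : Option Int) (xs : List (String × String)) (x : String × String) :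
    cutoffAux terms s c (xs ++ [x])
      = if PySem.Str.lower x.2 ∈ terms then some (s + xs.length)
        else cutoffAux terms s c xs := by
  unfold cutoffAux
  rw [PySem.List.enumerate_append, List.foldl_append]
  simp [PySem.List.enumerate]

theorem cutoff_bound (terms : PySem.Set String) (xs : List (String × String)) (i : Int) :
    cutoffAux terms 0 none xs = some i → 0 ≤ i ∧ i.toNat < xs.length := by
  induction xs using List.reverseRecOn with
  | nil => intro h; simp [cutoffAux, PySem.List.enumerate] at h
  | append_singleton xs x ih =>
    rw [cutoffAux_append]
    split
    · intro h
      obtain rfl : (xs.length : Int) = i := by simpa using h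
      constructor
      · positivity
      · simp
    · intro h
      obtain ⟨h0, hlt⟩ := ih h
      refine ⟨h0, ?_⟩
      simp
      omega

theorem altTrim_eq (terms : PySem.Set String) (xs suffix : List (String × String)) :
    altTrim terms xs.reverse suffix
      = match cutoffAux terms 0 none xs with
        | none => none
        | some i => some (xs.drop i.toNat ++ suffix) := by
  induction xs using List.reverseRecOn generalizing suffix with
  | nil => simp [altTrim, cutoffAux, PySem.List.enumerate]
  | append_singleton xs x ih =>
    rw [cutoffAux_append]
    have hrev : (xs ++ [x]).reverse = x :: xs.reverse := by simp
    rw [hrev]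
    by_cases hx : PySem.Str.lower x.2 ∈ terms
    · simp [altTrim, hx]
    · simp only [altTrim, if_neg hx, ih]
      cases hc : cutoffAux terms 0 none xs with
      | none => simp
      | some i =>
        obtain ⟨h0, hlt⟩ := cutoff_bound terms xs i hc
        have hd : List.drop i.toNat (xs ++ [x]) = List.drop i.toNat xs ++ [x] :=
          List.drop_append_of_le_length (by omega)
        simp [hd]

-- ===== VERDICT (by name: the statement is the Claim_ definition above) =====
theorem taxonomy_chain_from_lineage_py_spec : Claim_equal_taxonomy_chain_from_lineage_py := by
  intro lineage taxonomy_terms _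
  unfold Spec_taxonomy_chain_from_lineage_py
  simp only [taxonomy_chain_from_lineage_py, taxonomy_chain_from_lineage_py_alt]
  rw [chain_eq]
  cases taxonomy_terms with
  | none => rfl
  | some ts =>
    simp only
    by_cases hts : ts.isEmpty
    · simp [hts]
    · simp only [hts, if_neg, Bool.not_eq_true]
      have h := altTrim_eq (termsLower ts) (bChain lineage) []
      cases hc : cutoffAux (termsLower ts) 0 none (bChain lineage) with
      | none =>
        rw [hc] at h
        simp only [cutoffAux] at hc
        simp [hc, h]
      | some i =>
        obtain ⟨h0, _⟩ := cutoff_bound _ _ _ hc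
        rw [hc] at h
        simp only [cutoffAux] at hc
        simp only [hc, h, Option.getD_some, List.append_nil]
        rw [PySem.List.slice_from _ h0]
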